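-- pv_equiv track=rewrite | github.com/priest321/CodeTask | DNA.py | get_affect
-- ===== SOURCE A (Python) =====
-- def get_affect(data: str, start: list, end: list):
--     dna = [("A", 1), ("C", 2), ("G", 3), ("T", 4)]
--     output = []
--     def get_value(partial_data):
--         for k, v in dna:
--             if k in partial_data:
--                 output.append(v)
--                 break
--
--     for i in range(len(start)):
--         partial_data = data[start[i]:end[i]+1]
--         get_value(partial_data)
--
--     return output
-- ===== SOURCE B (Python) =====
-- def get_affect(data: str, start: list, end: list):
--     # Prefix counts per letter, then O(1) membership test per query.
--     n = len(data)
--     pa, pc, pg, pt = [0], [0], [0], [0]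
--     ca = cc = cg = ct = 0
--     for ch in data:
--         if ch == 'A':
--             ca += 1
--         elif ch == 'C':
--             cc += 1
--         elif ch == 'G':
--             cg += 1
--         elif ch == 'T':
--             ct += 1
--         pa.append(ca); pc.append(cc); pg.append(cg); pt.append(ct)
--
--     def clamp(i):
--         if i < 0:
--             i += n
--         if i < 0:
--             return 0
--         return n if i > n else i
--
--     output = []
--     for i in range(len(start)):
--         a = clamp(start[i])
--         b = clamp(end[i] + 1)
--         if pa[b] > pa[a]:
--             output.append(1)
--         elif pc[b] > pc[a]:
--             output.append(2)
--         elif pg[b] > pg[a]: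
--             output.append(3)
--         elif pt[b] > pt[a]:
--             output.append(4)
--     return output
-- ===== Notes on version B (the rewrite author's own statement) =====
-- stated objective: alternative
-- what changed: B precomputes prefix counts of A/C/G/T over data in one pass and answers each query with O(1) prefix-difference comparisons instead of scanning the sliced substring up to four times per query; the measured running time is about the same.
import Mathlib
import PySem

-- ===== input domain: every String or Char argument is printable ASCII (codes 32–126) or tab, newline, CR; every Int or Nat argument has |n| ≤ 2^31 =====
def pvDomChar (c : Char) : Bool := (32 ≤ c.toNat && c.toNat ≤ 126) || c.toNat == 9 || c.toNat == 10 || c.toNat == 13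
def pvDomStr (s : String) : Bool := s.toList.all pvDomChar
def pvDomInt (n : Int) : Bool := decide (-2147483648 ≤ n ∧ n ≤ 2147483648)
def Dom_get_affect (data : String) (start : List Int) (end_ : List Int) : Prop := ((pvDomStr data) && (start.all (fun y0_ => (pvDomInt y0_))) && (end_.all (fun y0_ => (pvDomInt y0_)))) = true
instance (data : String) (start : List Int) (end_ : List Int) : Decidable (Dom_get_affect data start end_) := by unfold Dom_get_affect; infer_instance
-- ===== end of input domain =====

-- B replaces A's per-query substring scans by one pass of prefix letter counts and O(1) prefix-difference checks per query (an alternative algorithm; measured time is similar); Pre_ excludes only inputs where A raises.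


-- ===== PORT A =====
-- dna = [("A", 1), ("C", 2), ("G", 3), ("T", 4)]
def dnaA : List (Char × Int) := [('A', 1), ('C', 2), ('G', 3), ('T', 4)]

-- get_value: first k of dna contained in partial_data appends v and breaks
def getValueA : List (Char × Int) → List Char → List Int → List Int
  | [], _, out => out
  | (k, v) :: rest, pd, out =>
      if PySem.Chars.isIn [k] pd then out ++ [v] else getValueA rest pd out

def get_affect (data : String) (start : List Int) (end_ : List Int) : List Int :=
  (PySem.List.pyRange 0 (start.length : Int) 1).foldl
    (fun out i =>
      getValueA dnaA
        (PySem.List.slice data.toList (some (PySem.List.pyGetD start i 0))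
          (some (PySem.List.pyGetD end_ i 0 + 1))) out)
    []

-- ===== PORT B =====
-- running prefix count of one letter (the python loop's running counter, appended each step)
def bPrefix (c : Char) (l : List Char) : List Nat :=
  l.scanl (fun acc ch => acc + (if ch = c then 1 else 0)) 0

-- python's local clamp(i): slice-bound normalisation
def bClampPos (n : Nat) (j : Int) : Nat :=
  if j < 0 then 0 else if j > (n : Int) then n else j.toNat

def bClamp (n : Nat) (i : Int) : Nat :=
  bClampPos n (if i < 0 then i + n else i)

def get_affect_alt (data : String) (start : List Int) (end_ : List Int) : List Int :=
  let l := data.toList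
  let n := l.length
  let pa := bPrefix 'A' l
  let pc := bPrefix 'C' l
  let pg := bPrefix 'G' l
  let pt := bPrefix 'T' l
  (PySem.List.pyRange 0 (start.length : Int) 1).foldl
    (fun out i =>
      let a := bClamp n (PySem.List.pyGetD start i 0)
      let b := bClamp n (PySem.List.pyGetD end_ i 0 + 1)
      if pa.getD b 0 > pa.getD a 0 then out ++ [1]
      else if pc.getD b 0 > pc.getD a 0 then out ++ [2]
      else if pg.getD b 0 > pg.getD a 0 then out ++ [3]
      else if pt.getD b 0 > pt.getD a 0 then out ++ [4]
      else out)
    []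

-- ===== PRECONDITION & SPEC =====
-- A indexes end[i] for every i < len(start): both programs raise IndexError when end is shorter than start, so those inputs are excluded.
def Pre_get_affect (data : String) (start : List Int) (end_ : List Int) : Prop :=
  start.length ≤ end_.length
instance (data : String) (start : List Int) (end_ : List Int) : Decidable (Pre_get_affect data start end_) := by unfold Pre_get_affect; infer_instance

def pvWitness_get_affect : String × List Int × List Int := ("GCAT", [0, 2, -1], [3, 1, 10])

def Spec_get_affect (data : String) (start : List Int) (end_ : List Int) (out : List Int) : Prop := out = get_affect_alt data start end_
instance (data : String) (start : List Int) (end_ : List Int) (out : List Int) : Decidable (Spec_get_affect data start end_ out) := by unfold Spec_get_affect; infer_instance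

-- ===== CLAIM (what is proved, stated in full; the proofs are below) =====
def Claim_equal_get_affect : Prop := ∀ (data : String) (start : List Int) (end_ : List Int), Dom_get_affect data start end_ → Pre_get_affect data start end_ → Spec_get_affect data start end_ (get_affect data start end_)

-- ===== LEMMAS AND PROOFS =====

-- B's clamp is exactly the slice-bound clamp slice uses
lemma bClamp_eq_clampIdx (n : Nat) (i : Int) : bClamp n i = PySem.List.clampIdx n i := by
  unfold bClamp bClampPos PySem.List.clampIdx
  split_ifs <;> omega

-- the scanl prefix list read at i ≤ len is the count over the first i characters
lemma scanl_count (c : Char) :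
    ∀ (l : List Char) (a i : Nat), i ≤ l.length →
      ((l.scanl (fun acc ch => acc + (if ch = c then 1 else 0)) a).getD i 0)
        = a + (l.take i).count c := by
  intro l
  induction l with
  | nil =>
      intro a i hi
      simp only [List.length_nil, Nat.le_zero] at hi
      subst hi
      simp [List.scanl]
  | cons x xs ih =>
      intro a i hi
      cases i with
      | zero => rw [List.scanl_cons]; simp
      | succ i =>
          rw [List.scanl_cons, List.getD_cons_succ, List.take_succ_cons,
            ih _ i (by simpa using hi)]
          by_cases hx : x = c <;> simp [hx, List.count_cons] <;> omega

lemma bPrefix_getD (c : Char) (l : List Char) (i : Nat) (hi : i ≤ l.length) :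
    (bPrefix c l).getD i 0 = (l.take i).count c := by
  unfold bPrefix
  simpa using scanl_count c l 0 i hi

-- a single letter is in a string iff its count there is positive
lemma isIn_singleton_iff (c : Char) (l : List Char) :
    PySem.Chars.isIn [c] l = true ↔ 0 < l.count c := by
  rw [PySem.Chars.isIn_iff_infix, List.count_pos_iff]
  constructor
  · rintro ⟨s, t, h⟩
    subst h; simp
  · intro h
    obtain ⟨s, t, h⟩ := List.append_of_mem h
    exact ⟨s, t, by simp [h]⟩

-- counts over prefixes decompose at any earlier cut
lemma count_take_add (c : Char) (l : List Char) (a b : Nat) (h : a ≤ b) :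
    (l.take b).count c = (l.take a).count c + ((l.drop a).take (b - a)).count c := by
  conv_lhs => rw [← List.take_append_drop a (l.take b)]
  rw [List.count_append, List.take_take, Nat.min_eq_left h, List.drop_take]

-- the membership test on the slice equals the prefix-difference test
lemma test_eq (c : Char) (l : List Char) (s e : Int) :
    (PySem.Chars.isIn [c] (PySem.List.slice l (some s) (some (e + 1))) = true)
      ↔ (bPrefix c l).getD (bClamp l.length (e + 1)) 0 > (bPrefix c l).getD (bClamp l.length s) 0 := by
  set a := PySem.List.clampIdx l.length s with ha
  set b := PySem.List.clampIdx l.length (e + 1) with hb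
  have han : a ≤ l.length := PySem.List.clampIdx_le _ _
  have hbn : b ≤ l.length := PySem.List.clampIdx_le _ _
  have hsl : PySem.List.slice l (some s) (some (e + 1)) = (l.drop a).take (b - a) := by
    simp [PySem.List.slice, ha, hb]
  rw [bClamp_eq_clampIdx, bClamp_eq_clampIdx, ← ha, ← hb,
      bPrefix_getD c l a han, bPrefix_getD c l b hbn, hsl, isIn_singleton_iff]
  rcases Nat.lt_or_ge b a with hab | hab
  · have hdec := count_take_add c l b a (Nat.le_of_lt hab)
    have hz : b - a = 0 := by omega
    rw [hz]
    simp
    omega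
  · rw [count_take_add c l a b hab]
    omega

-- one query of A equals one query of B
lemma step_eq (l : List Char) (s e : Int) (out : List Int) :
    getValueA dnaA (PySem.List.slice l (some s) (some (e + 1))) out
      = (if (bPrefix 'A' l).getD (bClamp l.length (e + 1)) 0 > (bPrefix 'A' l).getD (bClamp l.length s) 0 then out ++ [1]
         else if (bPrefix 'C' l).getD (bClamp l.length (e + 1)) 0 > (bPrefix 'C' l).getD (bClamp l.length s) 0 then out ++ [2]
         else if (bPrefix 'G' l).getD (bClamp l.length (e + 1)) 0 > (bPrefix 'G' l).getD (bClamp l.length s) 0 then out ++ [3]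
         else if (bPrefix 'T' l).getD (bClamp l.length (e + 1)) 0 > (bPrefix 'T' l).getD (bClamp l.length s) 0 then out ++ [4]
         else out) := by
  have hA := test_eq 'A' l s e
  have hC := test_eq 'C' l s e
  have hG := test_eq 'G' l s e
  have hT := test_eq 'T' l s e
  simp only [dnaA, getValueA]
  split_ifs <;> simp_all <;> omega

-- ===== VERDICT (by name: the statement is the Claim_ definition above) =====
theorem get_affect_spec : Claim_equal_get_affect := by
  intro data start end_ _hdom _hpre
  unfold Spec_get_affect get_affect get_affect_alt
  apply PySem.List.foldl_congr_mem
  intro out i _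
  exact step_eq data.toList (PySem.List.pyGetD start i 0) (PySem.List.pyGetD end_ i 0) out
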